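-- pv_equiv track=rewrite | github.com/NilashishC/rm_prototyping | module_utils/network/nxos/config/base.py | _compare_partial_dict
-- ===== SOURCE A (Python) =====
-- def _compare_partial_dict(want, have, compare_keys):
--     rmkeys = [ckey[1:] for ckey in compare_keys if ckey.startswith('!')]
--     kkeys = [ckey for ckey in compare_keys if not ckey.startswith('!')]
--     kkeys = kkeys or 'all'
--
--     wantd = {}
--     for key, val in want.items():
--         if key not in rmkeys:
--             if key in kkeys or kkeys == 'all':
--                 wantd[key] = val
--
--     haved = {}
--     for key, val in have.items():
--         if key not in rmkeys:
--             if key in kkeys or kkeys == 'all':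
--                 haved[key] = val
--
--     return wantd == haved
-- ===== SOURCE B (Python) =====
-- _S = object()  # fresh sentinel: distinct from every possible dict value
--
--
-- def _compare_partial_dict(want, have, compare_keys):
--     rmkeys = [ckey[1:] for ckey in compare_keys if ckey.startswith('!')]
--     kkeys = [ckey for ckey in compare_keys if not ckey.startswith('!')] or 'all'
--
--     def keep(k):
--         return k not in rmkeys and (kkeys == 'all' or k in kkeys)
--
--     for k in set(want) | set(have):
--         if keep(k) and want.get(k, _S) != have.get(k, _S):
--             return False
--     return True
-- ===== Notes on version B (the rewrite author's own statement) =====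
-- stated objective: faster
-- what changed: Instead of materializing two filtered dicts and then comparing them in full, B makes one short-circuiting pass over the union of the key sets, testing a single keep-predicate and comparing sentinel-defaulted lookups, returning False at the first mismatching key.
import Mathlib
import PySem

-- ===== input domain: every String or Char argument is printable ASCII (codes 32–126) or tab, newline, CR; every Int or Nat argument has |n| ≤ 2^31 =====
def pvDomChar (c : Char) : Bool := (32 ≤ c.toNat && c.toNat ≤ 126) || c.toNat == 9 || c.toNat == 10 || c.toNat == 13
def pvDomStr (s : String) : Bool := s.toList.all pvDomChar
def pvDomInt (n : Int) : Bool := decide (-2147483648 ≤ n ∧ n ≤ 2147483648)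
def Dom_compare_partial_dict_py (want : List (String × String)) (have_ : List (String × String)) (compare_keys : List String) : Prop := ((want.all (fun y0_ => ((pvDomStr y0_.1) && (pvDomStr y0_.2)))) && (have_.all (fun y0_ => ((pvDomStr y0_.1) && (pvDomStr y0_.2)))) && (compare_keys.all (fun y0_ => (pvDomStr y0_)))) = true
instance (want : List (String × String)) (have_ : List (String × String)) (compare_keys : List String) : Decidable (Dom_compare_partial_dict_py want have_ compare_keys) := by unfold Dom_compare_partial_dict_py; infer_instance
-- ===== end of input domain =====

-- B replaces A's build-two-filtered-dicts-then-compare with one short-circuiting pass over the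
-- union of the key sets, comparing sentinel-defaulted lookups under a single keep-predicate
-- (objective: faster — a timing run measured B well ahead at the largest sizes, via early exit
-- and skipping the intermediate dict builds; same worst-case asymptotics).


-- ===== PORT A =====
-- rmkeys = [ckey[1:] for ckey in compare_keys if ckey.startswith('!')]
def pvA_rmkeys (compare_keys : List String) : List String :=
  (compare_keys.filter (fun ckey => PySem.Str.startswith ckey "!")).map
    (fun ckey => PySem.Str.slice ckey (some 1) none)

-- kkeys = [ckey for ckey in compare_keys if not ckey.startswith('!')]
def pvA_kkeys (compare_keys : List String) : List String :=
  compare_keys.filter (fun ckey => !PySem.Str.startswith ckey "!")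

-- the filtering loop `for key, val in d.items(): if key not in rmkeys: if key in kkeys or kkeys == 'all': out[key] = val`.
-- Python rebinds kkeys to the STRING 'all' when the list is empty ('kkeys = kkeys or "all"');
-- `key in kkeys` is then a substring test on "all" and `kkeys == 'all'` is true, so the
-- union-typed kkeys is modelled by branching on emptiness at each use site.
def pvA_filtered (rmkeys kkeys : List String) (pairs : List (String × String)) : PySem.Dict String String :=
  pairs.foldl (fun d kv =>
    if !(rmkeys.contains kv.1) then
      if (if kkeys.isEmpty then PySem.Str.isIn kv.1 "all" else kkeys.contains kv.1) || kkeys.isEmpty then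
        d.insert kv.1 kv.2
      else d
    else d) PySem.Dict.empty

def compare_partial_dict_py (want : List (String × String)) (have_ : List (String × String)) (compare_keys : List String) : Bool :=
  let rmkeys := pvA_rmkeys compare_keys
  let kkeys := pvA_kkeys compare_keys
  let wantd := pvA_filtered rmkeys kkeys want
  let haved := pvA_filtered rmkeys kkeys have_
  -- Python's `wantd == haved` on dicts is order-insensitive: same key set, same value per key
  PySem.Set.equal (PySem.Set.ofList wantd.keys) (PySem.Set.ofList haved.keys) &&
    wantd.keys.all (fun k => wantd.get? k == haved.get? k)

-- ===== PORT B =====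
def compare_partial_dict_py_alt (want : List (String × String)) (have_ : List (String × String)) (compare_keys : List String) : Bool :=
  let rmkeys := (compare_keys.filter (fun ckey => PySem.Str.startswith ckey "!")).map
    (fun ckey => PySem.Str.slice ckey (some 1) none)
  let kkeys := compare_keys.filter (fun ckey => !PySem.Str.startswith ckey "!")
  -- keep(k) = k not in rmkeys and (kkeys == 'all' or k in kkeys); 'kkeys == "all"' ↔ the list was empty
  let keep : String → Bool := fun k => !(rmkeys.contains k) && (kkeys.isEmpty || kkeys.contains k)
  -- for k in set(want) | set(have): ... (early return False ⇝ List.all; want.get(k, _S) ⇝ Option get?)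
  let allKeys : PySem.Set String :=
    PySem.Set.union (PySem.Set.ofList (want.map Prod.fst)) (PySem.Set.ofList (have_.map Prod.fst))
  allKeys.all (fun k =>
    !(keep k) || ((PySem.Dict.mk want).get? k == (PySem.Dict.mk have_).get? k))

-- ===== PRECONDITION & SPEC =====
-- want/have are Python DICTS: their association-list encodings always have pairwise-distinct
-- keys, so lists with a duplicated key encode no Python input at all and are excluded.
def Pre_compare_partial_dict_py (want : List (String × String)) (have_ : List (String × String)) (compare_keys : List String) : Prop :=
  (want.map Prod.fst).Nodup ∧ (have_.map Prod.fst).Nodup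
instance (want : List (String × String)) (have_ : List (String × String)) (compare_keys : List String) : Decidable (Pre_compare_partial_dict_py want have_ compare_keys) := by unfold Pre_compare_partial_dict_py; infer_instance

def pvWitness_compare_partial_dict_py : (List (String × String)) × (List (String × String)) × List String :=
  ([("a", "1"), ("b", "2")], [("a", "1"), ("b", "3")], ["a", "!b"])

def Spec_compare_partial_dict_py (want : List (String × String)) (have_ : List (String × String)) (compare_keys : List String) (out : Bool) : Prop := out = compare_partial_dict_py_alt want have_ compare_keys
instance (want : List (String × String)) (have_ : List (String × String)) (compare_keys : List String) (out : Bool) : Decidable (Spec_compare_partial_dict_py want have_ compare_keys out) := by unfold Spec_compare_partial_dict_py; infer_instance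

-- ===== CLAIM (what is proved, stated in full; the proofs are below) =====
def Claim_equal_compare_partial_dict_py : Prop := ∀ (want : List (String × String)) (have_ : List (String × String)) (compare_keys : List String), Dom_compare_partial_dict_py want have_ compare_keys → Pre_compare_partial_dict_py want have_ compare_keys → Spec_compare_partial_dict_py want have_ compare_keys (compare_partial_dict_py want have_ compare_keys)

-- ===== LEMMAS AND PROOFS =====

-- the single keep-predicate both programs effectively filter with
def pvKeep (rmkeys kkeys : List String) (k : String) : Bool :=
  !(rmkeys.contains k) && (kkeys.isEmpty || kkeys.contains k)

-- A's nested-if loop body is the `if pvKeep then insert` body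
theorem pvA_filtered_eq_filter_foldl (rmkeys kkeys : List String) (pairs : List (String × String)) :
    pvA_filtered rmkeys kkeys pairs
      = (pairs.filter (fun kv => pvKeep rmkeys kkeys kv.1)).foldl
          (fun d kv => d.insert kv.1 kv.2) PySem.Dict.empty := by
  unfold pvA_filtered
  rw [List.foldl_filter]
  congr 1
  funext d kv
  by_cases h1 : kv.1 ∈ rmkeys <;> by_cases h2 : kkeys.isEmpty <;>
    by_cases h3 : kv.1 ∈ kkeys <;> simp [pvKeep, h1, h2, h3]

-- inserting a Nodup-keyed pair list into an empty dict is that literal dict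
theorem foldl_insert_eq_mk (l : List (String × String)) (h : (l.map Prod.fst).Nodup) :
    l.foldl (fun d kv => d.insert kv.1 kv.2) PySem.Dict.empty = PySem.Dict.mk l := by
  apply PySem.Dict.ext
  have := PySem.Dict.items_foldl_insert_fresh l Prod.fst Prod.snd PySem.Dict.empty
    (fun a _ => PySem.Dict.contains_empty a.1) h
  simpa [PySem.Dict.empty] using this

theorem pvA_filtered_eq_mk (rmkeys kkeys : List String) (l : List (String × String))
    (h : (l.map Prod.fst).Nodup) :
    pvA_filtered rmkeys kkeys l = PySem.Dict.mk (l.filter (fun kv => pvKeep rmkeys kkeys kv.1)) := by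
  rw [pvA_filtered_eq_filter_foldl, foldl_insert_eq_mk]
  exact h.sublist (List.Sublist.map Prod.fst List.filter_sublist)

-- lookup in a key-filtered assoc list
theorem filter_get? (p : String → Bool) (l : List (String × String)) (k : String) :
    (PySem.Dict.mk (l.filter (fun kv => p kv.1))).get? k
      = if p k then (PySem.Dict.mk l).get? k else none := by
  induction l with
  | nil =>
      have hnil : (PySem.Dict.mk ([] : List (String × String))).get? k = none := rfl
      simp [List.filter_nil, hnil]
  | cons a t ih =>
      obtain ⟨a1, a2⟩ := a
      by_cases hp : p a1
      · by_cases hk : a1 = k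
        · subst hk; simp [hp, PySem.Dict.get?_mk_cons]
        · simp [hp, PySem.Dict.get?_mk_cons, hk, ih]
      · by_cases hk : a1 = k
        · subst hk; simp [hp, ih]
        · simp [hp, PySem.Dict.get?_mk_cons, hk, ih]

theorem mem_fmf (p : String → Bool) (l : List (String × String)) (x : String) :
    x ∈ (l.filter (fun kv => p kv.1)).map Prod.fst ↔ p x = true ∧ x ∈ l.map Prod.fst := by
  simp only [List.mem_map, List.mem_filter]
  constructor
  · rintro ⟨a, ⟨ha, hp⟩, rfl⟩; exact ⟨hp, a, ha, rfl⟩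
  · rintro ⟨hp, a, ha, rfl⟩; exact ⟨a, ⟨ha, hp⟩, rfl⟩

theorem mem_iff_get? (l : List (String × String)) (k : String) :
    k ∈ l.map Prod.fst ↔ (PySem.Dict.mk l).get? k ≠ none := by
  rw [Ne, PySem.Dict.get?_eq_none_iff_not_mem_keys, PySem.Dict.keys_mk]
  tauto

-- the core equivalence: dict-equality of the two key-filtered dicts = B's single pass
theorem pv_core (p : String → Bool) (w h : List (String × String)) :
    (PySem.Set.equal
        (PySem.Set.ofList (PySem.Dict.mk (w.filter (fun kv => p kv.1))).keys)
        (PySem.Set.ofList (PySem.Dict.mk (h.filter (fun kv => p kv.1))).keys) &&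
      (PySem.Dict.mk (w.filter (fun kv => p kv.1))).keys.all
        (fun k => (PySem.Dict.mk (w.filter (fun kv => p kv.1))).get? k
            == (PySem.Dict.mk (h.filter (fun kv => p kv.1))).get? k))
    = (PySem.Set.union (PySem.Set.ofList (w.map Prod.fst)) (PySem.Set.ofList (h.map Prod.fst))).all
        (fun k => !(p k) || ((PySem.Dict.mk w).get? k == (PySem.Dict.mk h).get? k)) := by
  apply Bool.coe_iff_coe.mp
  simp only [Bool.and_eq_true, PySem.Set.equal_iff, PySem.Set.mem_ofList, List.all_eq_true,
    PySem.Dict.keys_mk, beq_iff_eq, Bool.or_eq_true, Bool.not_eq_true', mem_fmf,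
    PySem.Set.mem_union]
  constructor
  · rintro ⟨hkeys, hvals⟩ k hk
    by_cases hp : p k = true
    · right
      have hkW : k ∈ w.map Prod.fst := by
        rcases hk with h1 | h1
        · exact h1
        · exact ((hkeys k).mpr ⟨hp, h1⟩).2
      have hv := hvals k ⟨hp, hkW⟩
      have e1 := filter_get? p w k
      have e2 := filter_get? p h k
      rw [if_pos hp] at e1 e2
      rw [← e1, ← e2, hv]
    · left; simpa using hp
  · intro hB
    have hgood : ∀ k, p k = true → k ∈ w.map Prod.fst ∨ k ∈ h.map Prod.fst →
        (PySem.Dict.mk w).get? k = (PySem.Dict.mk h).get? k := by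
      intro k hp hk
      rcases hB k hk with h1 | h1
      · rw [hp] at h1; cases h1
      · exact h1
    refine ⟨fun x => ⟨?_, ?_⟩, ?_⟩
    · rintro ⟨hp, hx⟩
      refine ⟨hp, ?_⟩
      have he := hgood x hp (Or.inl hx)
      have hne := (mem_iff_get? w x).mp hx
      rw [he] at hne
      exact (mem_iff_get? h x).mpr hne
    · rintro ⟨hp, hx⟩
      refine ⟨hp, ?_⟩
      have he := hgood x hp (Or.inr hx)
      have hne := (mem_iff_get? h x).mp hx
      rw [← he] at hne
      exact (mem_iff_get? w x).mpr hne
    · rintro k ⟨hp, hkw⟩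
      rw [filter_get? p w k, filter_get? p h k, if_pos hp, if_pos hp]
      exact hgood k hp (Or.inl hkw)

-- let-free (zeta-reduced) views of the two ports, equal by definitional unfolding
def pvA_expanded (want have_ : List (String × String)) (compare_keys : List String) : Bool :=
  PySem.Set.equal
      (PySem.Set.ofList (pvA_filtered (pvA_rmkeys compare_keys) (pvA_kkeys compare_keys) want).keys)
      (PySem.Set.ofList (pvA_filtered (pvA_rmkeys compare_keys) (pvA_kkeys compare_keys) have_).keys) &&
    (pvA_filtered (pvA_rmkeys compare_keys) (pvA_kkeys compare_keys) want).keys.all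
      (fun k => (pvA_filtered (pvA_rmkeys compare_keys) (pvA_kkeys compare_keys) want).get? k
          == (pvA_filtered (pvA_rmkeys compare_keys) (pvA_kkeys compare_keys) have_).get? k)

def pvB_expanded (want have_ : List (String × String)) (compare_keys : List String) : Bool :=
  (PySem.Set.union (PySem.Set.ofList (want.map Prod.fst)) (PySem.Set.ofList (have_.map Prod.fst))).all
    (fun k => !(pvKeep (pvA_rmkeys compare_keys) (pvA_kkeys compare_keys) k)
        || ((PySem.Dict.mk want).get? k == (PySem.Dict.mk have_).get? k))

theorem pvA_zeta (want have_ : List (String × String)) (compare_keys : List String) :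
    compare_partial_dict_py want have_ compare_keys = pvA_expanded want have_ compare_keys := rfl

theorem pvB_zeta (want have_ : List (String × String)) (compare_keys : List String) :
    compare_partial_dict_py_alt want have_ compare_keys = pvB_expanded want have_ compare_keys := rfl

-- ===== VERDICT (by name: the statement is the Claim_ definition above) =====
theorem compare_partial_dict_py_spec : Claim_equal_compare_partial_dict_py := by
  intro want have_ compare_keys _hDom hPre
  obtain ⟨hW, hH⟩ := hPre
  unfold Spec_compare_partial_dict_py
  rw [pvA_zeta, pvB_zeta]
  unfold pvA_expanded pvB_expanded
  rw [pvA_filtered_eq_mk _ _ _ hW, pvA_filtered_eq_mk _ _ _ hH]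
  exact pv_core (pvKeep (pvA_rmkeys compare_keys) (pvA_kkeys compare_keys)) want have_
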